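-- pv_equiv track=rewrite | github.com/junbeom-kang/Baekjoon | CodingTest/카카오인턴쉽/징검다리건너기.py | check
-- ===== SOURCE A (Python) =====
-- def check(minus,stones,k):
--     i=-1
--     l=len(stones)
--     while i<l:
--         can=False
--         for j in range(1,k+1):
--             if i+j>=l:
--                 can=True
--                 i+=j
--                 break
--             if stones[i+j]-minus>0:
--                 can=True
--                 i+=j
--                 break
--         if not can:
--             return False
--     if i>=l:
--         return True
--     else:
--         return False
-- ===== SOURCE B (Python) =====
-- def check(minus, stones, k):
--     cur = best = 0
--     for s in stones:
--         if s - minus <= 0: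
--             cur += 1
--             if cur > best:
--                 best = cur
--         else:
--             cur = 0
--     return best < k
-- ===== Notes on version B (the rewrite author's own statement) =====
-- stated objective: simpler
-- what changed: Replaces the jump simulation (while-loop with an inner range(1,k+1) scan) by a single left-to-right pass that tracks the longest run of consecutive stones with value <= minus and returns longest_run < k.
import Mathlib
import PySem

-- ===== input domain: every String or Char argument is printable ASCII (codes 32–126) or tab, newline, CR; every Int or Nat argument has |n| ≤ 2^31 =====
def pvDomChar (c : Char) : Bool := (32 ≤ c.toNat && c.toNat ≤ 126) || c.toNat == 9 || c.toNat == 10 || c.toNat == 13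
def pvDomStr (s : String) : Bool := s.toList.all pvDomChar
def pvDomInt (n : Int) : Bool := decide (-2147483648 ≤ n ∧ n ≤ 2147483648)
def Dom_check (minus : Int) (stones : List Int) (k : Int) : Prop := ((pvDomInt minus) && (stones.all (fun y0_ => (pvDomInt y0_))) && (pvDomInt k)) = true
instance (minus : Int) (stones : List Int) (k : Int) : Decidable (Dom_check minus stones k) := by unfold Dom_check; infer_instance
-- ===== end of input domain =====

-- B is a single pass computing the longest run of consecutive stones with value ≤ minus,
-- returning (longest run < k); A simulates the jumps.  Objective: simpler.

-- ===== PORT A =====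
-- inner 'for j in range(1, k+1)' loop: returns the new i if some break fired ('can'),
-- none if the range was exhausted ('not can').  The fuel argument is the number of
-- remaining range iterations, (k+1-j).toNat -- a totality guard only.
def checkInner (minus : Int) (stones : List Int) (l : Int) (i : Int) (k : Int) : Nat → Int → Option Int
  | 0, _ => none
  | f + 1, j =>
    if i + j ≥ l then some (i + j)
    else if (PySem.List.pyGet? stones (i + j)).getD 0 - minus > 0 then some (i + j)
    else checkInner minus stones l i k f (j + 1)

-- the 'while i < l' loop (fuel: i strictly increases each iteration, so l + 2 steps
-- from i = -1 always suffice); after it, 'if i >= l: return True else: return False'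
def checkLoop (minus : Int) (stones : List Int) (l : Int) (k : Int) : Nat → Int → Bool
  | 0, _ => false
  | f + 1, i =>
    if i < l then
      match checkInner minus stones l i k k.toNat 1 with
      | some i' => checkLoop minus stones l k f i'
      | none => false
    else if i ≥ l then true else false

def check (minus : Int) (stones : List Int) (k : Int) : Bool :=
  checkLoop minus stones (stones.length : Int) k (stones.length + 2) (-1)

-- ===== PORT B =====
def check_alt (minus : Int) (stones : List Int) (k : Int) : Bool :=
  decide ((stones.foldl
    (fun (p : Int × Int) s =>
      if s - minus ≤ 0 then
        let cur := p.1 + 1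
        (cur, if cur > p.2 then cur else p.2)
      else (0, p.2)) (0, 0)).2 < k)

-- ===== PRECONDITION & SPEC =====
def Spec_check (minus : Int) (stones : List Int) (k : Int) (out : Bool) : Prop := out = check_alt minus stones k
instance (minus : Int) (stones : List Int) (k : Int) (out : Bool) : Decidable (Spec_check minus stones k out) := by unfold Spec_check; infer_instance

-- ===== CLAIM (what is proved, stated in full; the proofs are below) =====
def Claim_equal_check : Prop := ∀ (minus : Int) (stones : List Int) (k : Int), Dom_check minus stones k → Spec_check minus stones k (check minus stones k)

-- ===== LEMMAS AND PROOFS =====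

-- number of leading stones with value ≤ minus
def leadN (minus : Int) : List Int → Nat
  | [] => 0
  | x :: xs => if x - minus ≤ 0 then 1 + leadN minus xs else 0

-- longest run of consecutive stones with value ≤ minus
def mrun (minus : Int) : List Int → Nat
  | [] => 0
  | x :: xs => max (leadN minus (x :: xs)) (mrun minus xs)

theorem leadN_le_length (minus : Int) (s : List Int) : leadN minus s ≤ s.length := by
  induction s with
  | nil => simp [leadN]
  | cons x xs ih => simp only [leadN]; split <;> simp <;> omega

theorem leadN_le_mrun (minus : Int) (s : List Int) : leadN minus s ≤ mrun minus s := by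
  cases s with
  | nil => simp [leadN, mrun]
  | cons x xs => simp [mrun]

theorem mrun_of_all_blocked (minus : Int) (s : List Int) (h : leadN minus s = s.length) :
    mrun minus s = s.length := by
  induction s with
  | nil => simp [mrun]
  | cons x xs ih =>
    simp only [leadN, List.length_cons] at h
    by_cases hb : x - minus ≤ 0
    · rw [if_pos hb] at h
      have hx : leadN minus xs = xs.length := by omega
      simp only [mrun, leadN, if_pos hb, ih hx, hx, List.length_cons]
      omega
    · rw [if_neg hb] at h
      have := leadN_le_length minus xs; omega

theorem mrun_split (minus : Int) (s : List Int) (h : leadN minus s < s.length) :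
    mrun minus s = max (leadN minus s) (mrun minus (s.drop (leadN minus s + 1))) := by
  induction s with
  | nil => simp at h
  | cons x xs ih =>
    by_cases hb : x - minus ≤ 0
    · have hl : leadN minus (x :: xs) = 1 + leadN minus xs := by simp [leadN, hb]
      have hx : leadN minus xs < xs.length := by simp [hl] at h ⊢; omega
      have hdrop : (x :: xs).drop (leadN minus (x :: xs) + 1) = xs.drop (leadN minus xs + 1) := by
        rw [hl]; simp [List.drop_succ_cons]; congr 1; omega
      rw [hdrop, mrun, hl, ih hx]
      have h1 := leadN_le_mrun minus xs
      cases xs with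
      | nil => simp at hx
      | cons y ys =>
        have : leadN minus (y :: ys) ≤ mrun minus (y :: ys) := leadN_le_mrun _ _
        simp only [mrun] at *
        omega
    · have hl : leadN minus (x :: xs) = 0 := by simp [leadN, hb]
      rw [hl]; simp only [mrun, hl, List.drop_succ_cons, List.drop_zero]

-- characterization of the inner for-loop via leadN of the suffix after position i+j
theorem checkInner_char (minus : Int) (stones : List Int) (l : Int) (i k : Int) :
    ∀ (f : Nat) (j : Int), l = (stones.length : Int) → 0 ≤ i + j → i + j ≤ l →
    (f : Int) = max (k + 1 - j) 0 →
    checkInner minus stones l i k f j =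
      (if (leadN minus (stones.drop (i + j).toNat) : Int) < k + 1 - j
       then some (i + j + (leadN minus (stones.drop (i + j).toNat) : Int)) else none) := by
  intro f
  induction f with
  | zero =>
    intro j hl h0 hle hf
    have hn : (0 : Int) ≤ (leadN minus (stones.drop (i + j).toNat) : Int) := Int.natCast_nonneg _
    rw [checkInner, if_neg (by omega)]
  | succ f ih =>
    intro j hl h0 hle hf
    rw [checkInner]
    by_cases hge : i + j ≥ l
    · rw [if_pos hge]
      have hij : i + j = l := le_antisymm hle hge
      have : (i + j).toNat = stones.length := by omega
      rw [this]
      simp [leadN]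
      omega
    · rw [if_neg hge]
      have hlt : (i + j).toNat < stones.length := by omega
      have hget : (PySem.List.pyGet? stones (i + j)).getD 0 = stones[(i + j).toNat] := by
        rw [PySem.List.pyGet?_of_nonneg stones h0,
            List.getElem?_eq_getElem (by omega : (i + j).toNat < stones.length)]; rfl
      have hdrop : stones.drop (i + j).toNat
          = stones[(i + j).toNat] :: stones.drop ((i + j).toNat + 1) :=
        List.drop_eq_getElem_cons hlt
      by_cases hst : (PySem.List.pyGet? stones (i + j)).getD 0 - minus > 0
      · rw [if_pos hst]
        rw [hget] at hst
        rw [hdrop]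
        have : leadN minus (stones[(i + j).toNat] :: stones.drop ((i + j).toNat + 1)) = 0 := by
          simp [leadN]; omega
        rw [this]
        simp
        omega
      · rw [if_neg hst]
        rw [hget] at hst
        have hb : stones[(i + j).toNat] - minus ≤ 0 := by omega
        have hdrop2 : (i + (j + 1)).toNat = (i + j).toNat + 1 := by omega
        rw [ih (j + 1) hl (by omega) (by omega) (by omega), hdrop2, hdrop]
        have hlead : leadN minus (stones[(i + j).toNat] :: stones.drop ((i + j).toNat + 1))
            = 1 + leadN minus (stones.drop ((i + j).toNat + 1)) := by simp [leadN, hb]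
        rw [hlead]
        by_cases hc : (leadN minus (stones.drop ((i + j).toNat + 1)) : Int) < k + 1 - (j + 1)
        · rw [if_pos hc, if_pos (by push_cast; omega)]
          congr 1; push_cast; ring
        · rw [if_neg hc, if_neg (by push_cast; omega)]

-- characterization of the while-loop
theorem checkLoop_char (minus : Int) (stones : List Int) (k : Int) :
    ∀ (fl : Nat) (i : Int), -1 ≤ i → i ≤ (stones.length : Int) →
    (stones.length : Int) - i + 1 ≤ (fl : Int) →
    checkLoop minus stones (stones.length : Int) k fl i =
      (if i ≥ (stones.length : Int) then true
       else decide (((mrun minus (stones.drop (i + 1).toNat) : Nat) : Int) < k)) := by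
  intro fl
  induction fl with
  | zero => intro i h1 h2 h3; omega
  | succ f ih =>
    intro i h1 hle hfl
    rw [checkLoop]
    by_cases hi : i < (stones.length : Int)
    · rw [if_pos hi, if_neg (by omega)]
      have hchar := checkInner_char minus stones (stones.length : Int) i k k.toNat 1 rfl
        (by omega) (by omega) (by omega)
      rw [hchar]
      set s' := stones.drop (i + 1).toNat with hs'
      set t := leadN minus s' with ht
      have hlen : s'.length = stones.length - (i + 1).toNat := by simp [hs']
      have htle : t ≤ s'.length := leadN_le_length _ _
      by_cases hc : (t : Int) < k + 1 - 1
      · rw [if_pos hc]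
        show checkLoop minus stones (stones.length : Int) k f (i + 1 + (t : Int))
            = decide (((mrun minus s' : Nat) : Int) < k)
        rw [ih (i + 1 + (t : Int)) (by omega) (by omega) (by omega)]
        by_cases hend : i + 1 + (t : Int) ≥ (stones.length : Int)
        · -- landed at l: the whole suffix was blocked
          rw [if_pos hend]
          have hteq : t = s'.length := by omega
          have := mrun_of_all_blocked minus s' hteq
          rw [this, ← hteq]
          simp; omega
        · rw [if_neg hend]
          have htlt : t < s'.length := by omega
          have hsplit := mrun_split minus s' htlt
          rw [← ht] at hsplit
          have hdd : stones.drop ((i + 1 + (t : Int)) + 1).toNat = s'.drop (t + 1) := by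
            rw [hs', List.drop_drop]; congr 1; omega
          rw [hdd, hsplit]
          simp only [decide_eq_decide]
          push_cast
          omega
      · rw [if_neg hc]
        show false = decide (((mrun minus s' : Nat) : Int) < k)
        have hlm : ((leadN minus s' : Nat) : Int) ≤ ((mrun minus s' : Nat) : Int) := by
          exact_mod_cast leadN_le_mrun minus s'
        have h2' : ¬ (((mrun minus s' : Nat) : Int) < k) := by rw [← ht] at hlm; omega
        simp [h2']
    · rw [if_neg hi, if_pos (by omega), if_pos (by omega)]

-- B's fold invariant: the running (cur, best) pair
theorem foldB_char (minus k : Int) (s : List Int) :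
    ∀ c b : Int, 0 ≤ c → c ≤ b →
    (s.foldl (fun (p : Int × Int) x =>
        if x - minus ≤ 0 then
          let cur := p.1 + 1
          (cur, if cur > p.2 then cur else p.2)
        else (0, p.2)) (c, b)).2
      = max b (max (c + (leadN minus s : Int)) (mrun minus s : Int)) := by
  induction s with
  | nil => intro c b h0 hcb; simp [leadN, mrun]; omega
  | cons x xs ih =>
    intro c b h0 hcb
    by_cases hb : x - minus ≤ 0
    · simp only [List.foldl_cons, if_pos hb]
      rw [ih (c + 1) (if c + 1 > b then c + 1 else b) (by omega) (by split <;> omega)]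
      have h1 : leadN minus (x :: xs) = 1 + leadN minus xs := by simp [leadN, hb]
      have h2 : mrun minus (x :: xs) = max (leadN minus (x :: xs)) (mrun minus xs) := rfl
      rw [h1, h2, h1]
      have := leadN_le_mrun minus xs
      push_cast
      split <;> omega
    · simp only [List.foldl_cons, if_neg hb]
      rw [ih 0 b le_rfl (by omega)]
      have h1 : leadN minus (x :: xs) = 0 := by simp [leadN, hb]
      have h2 : mrun minus (x :: xs) = max (leadN minus (x :: xs)) (mrun minus xs) := rfl
      rw [h1, h2, h1]
      have := leadN_le_mrun minus xs
      push_cast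
      omega

theorem check_alt_eq (minus : Int) (stones : List Int) (k : Int) :
    check_alt minus stones k = decide ((mrun minus stones : Int) < k) := by
  unfold check_alt
  rw [foldB_char minus k stones 0 0 le_rfl le_rfl]

  have := leadN_le_mrun minus stones
  simp only [decide_eq_decide]
  omega

-- ===== VERDICT (by name: the statement is the Claim_ definition above) =====
theorem check_spec : Claim_equal_check := by
  intro minus stones k _
  unfold Spec_check check
  rw [checkLoop_char minus stones k (stones.length + 2) (-1) (by omega) (by omega)
        (by push_cast; omega),
      check_alt_eq]
  rw [if_neg (by omega)]
  norm_num
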